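-- pv_equiv track=rewrite | github.com/gskolysz/adventofcode2020 | day06/main.py | solve
-- ===== SOURCE A (Python) =====
-- from collections import Counter
--
-- def count_group_answers_one_yes(group: list[str]) -> int:
--     unique_questions = set()
--     for person in group:
--         # for question in person:
--         unique_questions.update(tuple(person))
--
--     return len(unique_questions)
--
-- def count_group_answers_all_yes(group: list[str]) -> int:
--     all_yes_questions = 0
--     people_count = len(group)
--     answers_counter = Counter()
--     for person in group:
--         answers_counter.update(tuple(person))
--
--     for question in answers_counter:
--         if answers_counter[question] == people_count:
--             all_yes_questions += 1
--
--     return all_yes_questions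
--
-- def solve(lines: list[str]) -> tuple[int, int]:
--     lines.append("") # so that the loop below can actually execute the function on the last group
--     group = []
--     sum_of_group_answers_one_yes = 0
--     sum_of_group_answers_all_yes = 0
--     for line in lines:
--         if line == "":
--             sum_of_group_answers_one_yes += count_group_answers_one_yes(group)
--             sum_of_group_answers_all_yes += count_group_answers_all_yes(group)
--             group = []
--         else:
--             group.append(line)
--
--     return sum_of_group_answers_one_yes, sum_of_group_answers_all_yes
-- ===== SOURCE B (Python) =====
-- def solve(lines: list[str]) -> tuple[int, int]:
--     lines.append("")  # same in-place mutation as the original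
--     one = 0
--     alls = 0
--     chars = []  # concatenated answers of the current group
--     n = 0       # number of people in the current group
--     for line in lines:
--         if line == "":
--             chars.sort()
--             i = 0
--             L = len(chars)
--             while i < L:
--                 j = i + 1
--                 while j < L and chars[j] == chars[i]:
--                     j += 1
--                 one += 1
--                 if j - i == n:
--                     alls += 1
--                 i = j
--             chars = []
--             n = 0
--         else:
--             chars.extend(line)
--             n += 1
--     return one, alls
-- ===== Notes on version B (the rewrite author's own statement) =====
-- stated objective: alternative
-- what changed: Replaced the per-group set-union and Counter hashing with sorting the group's concatenated characters and counting runs (run count = distinct answers, runs of length == group size = unanimous answers), keeping only a char buffer and a person count instead of the group list.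
import Mathlib
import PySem

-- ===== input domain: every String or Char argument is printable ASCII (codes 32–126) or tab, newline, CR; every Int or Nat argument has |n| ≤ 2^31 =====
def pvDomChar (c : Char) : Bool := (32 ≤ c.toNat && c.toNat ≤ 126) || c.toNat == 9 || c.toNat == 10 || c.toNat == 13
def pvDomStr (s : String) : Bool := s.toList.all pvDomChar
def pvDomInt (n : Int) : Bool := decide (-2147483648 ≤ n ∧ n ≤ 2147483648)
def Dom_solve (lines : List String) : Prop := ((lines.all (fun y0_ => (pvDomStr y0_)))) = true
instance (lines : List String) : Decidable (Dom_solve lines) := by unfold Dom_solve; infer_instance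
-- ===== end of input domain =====

-- B replaces per-group set/Counter hashing with sorting the group's concatenated characters and
-- counting runs; equivalence is about the RETURN value (both Pythons perform the same lines.append("")).

-- ===== PORT A =====
-- count_group_answers_one_yes: set built by update(tuple(person)) per person, then its len
def countOneA (group : List String) : Int :=
  ((group.foldl (fun s p => PySem.Set.update s p.toList) (PySem.Set.empty : PySem.Set Char)).length : Int)

-- count_group_answers_all_yes: Counter updated per person, then count keys whose count == len(group)
def countAllA (group : List String) : Int :=
  let peopleCount : Int := (group.length : Int)
  let ctr : PySem.Dict Char Int :=
    group.foldl (fun d p => p.toList.foldl (fun d x => d.modify x 0 (· + 1)) d) PySem.Dict.empty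
  ctr.keys.foldl (fun acc q => if ctr.getD q 0 = peopleCount then acc + 1 else acc) 0

def solve (lines : List String) : Int × Int :=
  let r := (lines ++ [""]).foldl
    (fun (st : List String × Int × Int) line =>
      if line = "" then ([], st.2.1 + countOneA st.1, st.2.2 + countAllA st.1)
      else (st.1 ++ [line], st.2.1, st.2.2))
    ([], 0, 0)
  (r.2.1, r.2.2)

-- ===== PORT B =====
-- run scan over the sorted char buffer: outer while advances run by run;
-- (#runs, #runs whose length equals the number of people n)
def pvRuns (n : Int) : List Char → Int × Int
  | [] => (0, 0)
  | c :: cs =>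
    let r := pvRuns n (cs.dropWhile (· == c))
    (r.1 + 1, r.2 + if ((cs.takeWhile (· == c)).length : Int) + 1 = n then 1 else 0)
termination_by s => s.length
decreasing_by
  simpa using Nat.lt_succ_of_le (List.Sublist.length_le (List.dropWhile_sublist _))

def solve_alt (lines : List String) : Int × Int :=
  let r := (lines ++ [""]).foldl
    (fun (st : (List Char × Int) × Int × Int) line =>
      if line = "" then
        let p := pvRuns st.1.2 (PySem.List.sorted st.1.1 (fun x => x) false)
        (([], 0), st.2.1 + p.1, st.2.2 + p.2)
      else ((st.1.1 ++ line.toList, st.1.2 + 1), st.2.1, st.2.2))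
    (([], 0), 0, 0)
  (r.2.1, r.2.2)

-- ===== PRECONDITION & SPEC =====
def Spec_solve (lines : List String) (out : Int × Int) : Prop := out = solve_alt lines
instance (lines : List String) (out : Int × Int) : Decidable (Spec_solve lines out) := by unfold Spec_solve; infer_instance

-- ===== CLAIM (what is proved, stated in full; the proofs are below) =====
def Claim_equal_solve : Prop := ∀ (lines : List String), Dom_solve lines → Spec_solve lines (solve lines)

-- ===== LEMMAS AND PROOFS =====

-- c does not reappear after its run in a sorted list
theorem not_mem_dropWhile (c : Char) (cs : List Char) (h : (c :: cs).Pairwise (· ≤ ·)) :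
    c ∉ cs.dropWhile (· == c) := by
  intro hc
  rcases List.pairwise_cons.1 h with ⟨hle, hcs⟩
  cases ht : cs.dropWhile (· == c) with
  | nil => simp [ht] at hc
  | cons d t' =>
    have hne : cs.dropWhile (· == c) ≠ [] := by rw [ht]; simp
    have hd0 := List.head_dropWhile_not (· == c) hne
    have hhead : (cs.dropWhile (· == c)).head hne = d := by simp [ht]
    have hdc : d ≠ c := by rw [hhead] at hd0; simpa using hd0
    have hdmem : d ∈ cs := (List.dropWhile_sublist _).mem (by rw [ht]; exact List.mem_cons_self)
    have hcd' : c < d := lt_of_le_of_ne (hle d hdmem) (Ne.symm hdc)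
    rw [ht] at hc
    rcases List.mem_cons.1 hc with h1 | h2
    · exact hdc h1.symm
    · have hpt : (d :: t').Pairwise (· ≤ ·) := by
        have := hcs.sublist (List.dropWhile_sublist (· == c))
        rwa [ht] at this
      have : d ≤ c := (List.pairwise_cons.1 hpt).1 c h2
      exact absurd (lt_of_lt_of_le hcd' this) (lt_irrefl c)

-- the run scan on a sorted list computes (#distinct, #values of multiplicity n)
theorem pvRuns_spec (n : Int) (s : List Char) (h : s.Pairwise (· ≤ ·)) :
    pvRuns n s = ((s.toFinset.card : Int),
      ((s.toFinset.filter (fun c => (s.count c : Int) = n)).card : Int)) := by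
  induction s using pvRuns.induct n with
  | case1 => simp [pvRuns]
  | case2 c cs ih =>
    set run := cs.takeWhile (· == c) with hrun
    set t := cs.dropWhile (· == c) with ht
    have hsplit : run ++ t = cs := List.takeWhile_append_dropWhile
    have hrc : ∀ x ∈ run, x = c := by
      intro x hx; simpa using List.mem_takeWhile_imp hx
    have hcnot : c ∉ t := not_mem_dropWhile c cs h
    have hpt : t.Pairwise (· ≤ ·) :=
      ((List.pairwise_cons.1 h).2).sublist (List.dropWhile_sublist (· == c))
    have ihs := ih hpt
    have hmem : ∀ x, x ∈ (c :: cs) ↔ x = c ∨ x ∈ t := by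
      intro x
      constructor
      · intro hx
        rcases List.mem_cons.1 hx with h1 | h2
        · exact Or.inl h1
        · rw [← hsplit] at h2
          rcases List.mem_append.1 h2 with h3 | h4
          · exact Or.inl (hrc x h3)
          · exact Or.inr h4
      · rintro (rfl | hx)
        · exact List.mem_cons_self
        · exact List.mem_cons_of_mem _ (by rw [← hsplit]; exact List.mem_append_right _ hx)
    have hfin : (c :: cs).toFinset = insert c t.toFinset := by
      ext x; simp only [List.mem_toFinset, Finset.mem_insert, hmem x]
    have hcfin : c ∉ t.toFinset := by simpa using hcnot
    have hcard : (c :: cs).toFinset.card = t.toFinset.card + 1 := by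
      rw [hfin, Finset.card_insert_of_notMem hcfin]
    have hcount_c : (c :: cs).count c = run.length + 1 := by
      rw [List.count_cons_self, ← hsplit, List.count_append]
      have h1 : run.count c = run.length := by
        rw [List.count_eq_length]; intro x hx; rw [hrc x hx]
      have h2 : t.count c = 0 := List.count_eq_zero.2 hcnot
      omega
    have hcount_ne : ∀ x, x ≠ c → (c :: cs).count x = t.count x := by
      intro x hx
      rw [List.count_cons_of_ne (Ne.symm hx), ← hsplit, List.count_append]
      have : run.count x = 0 := List.count_eq_zero.2 (fun hm => hx (hrc x hm))
      omega
    have hfilter : ((c :: cs).toFinset.filter (fun x => ((c :: cs).count x : Int) = n)).card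
        = (t.toFinset.filter (fun x => (t.count x : Int) = n)).card
          + (if (run.length : Int) + 1 = n then 1 else 0) := by
      rw [hfin, Finset.filter_insert]
      have hcongr : (t.toFinset.filter (fun x => ((c :: cs).count x : Int) = n))
          = (t.toFinset.filter (fun x => (t.count x : Int) = n)) := by
        apply Finset.filter_congr
        intro x hx
        have hxc : x ≠ c := fun he => hcfin (he ▸ hx)
        simp [hcount_ne x hxc]
      by_cases hp : ((c :: cs).count c : Int) = n
      · rw [if_pos hp, Finset.card_insert_of_notMem (fun hm => hcfin (Finset.mem_filter.1 hm).1), hcongr]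
        have : (run.length : Int) + 1 = n := by rw [← hp, hcount_c]; push_cast; ring
        rw [if_pos this]
      · rw [if_neg hp, hcongr]
        have : ¬ ((run.length : Int) + 1 = n) := by
          intro hc2; apply hp; rw [hcount_c]; push_cast; omega
        rw [if_neg this]; simp
    rw [pvRuns]
    simp only [← hrun, ← ht, ihs]
    refine Prod.ext ?_ ?_
    · simp only [hcard]; push_cast; ring
    · simp only [hfilter]; push_cast; ring

theorem toFinset_dedup (l : List Char) : (PySem.List.dedup l).toFinset = l.toFinset := by
  ext x; simp

-- A's per-person set updates are one Set.ofList of the concatenation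
theorem set_fold_eq (g : List String) (s0 : PySem.Set Char) :
    g.foldl (fun s p => PySem.Set.update s p.toList) s0
      = PySem.Set.update s0 (g.map String.toList).flatten := by
  induction g generalizing s0 with
  | nil => rfl
  | cons p g ih =>
    simp only [List.foldl_cons, List.map_cons, List.flatten_cons, ih]
    show _ = (p.toList ++ _).foldl PySem.Set.add s0
    rw [List.foldl_append]
    rfl

theorem countOneA_eq (g : List String) :
    countOneA g = (((g.map String.toList).flatten.toFinset.card : Nat) : Int) := by
  unfold countOneA
  rw [set_fold_eq]
  have h1 : PySem.Set.update (PySem.Set.empty : PySem.Set Char) (g.map String.toList).flatten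
      = PySem.List.dedup (g.map String.toList).flatten := by
    simp [PySem.Set.update, PySem.Set.ofList_eq_foldl]
  rw [h1, ← toFinset_dedup, List.toFinset_card_of_nodup (PySem.List.nodup_dedup _)]

-- A's per-person Counter updates are Counter of the concatenation
theorem ctr_fold_eq (g : List String) :
    g.foldl (fun d p => p.toList.foldl (fun d x => d.modify x 0 (· + 1)) d)
        (PySem.Dict.empty : PySem.Dict Char Int)
      = PySem.Dict.counter (g.map String.toList).flatten := by
  rw [PySem.Dict.counter_eq_foldl, List.foldl_flatten, List.foldl_map]

theorem nodup_filter_length (l : List Char) (p : Char → Bool) (h : l.Nodup) :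
    ((l.filter p).length : Int) = ((l.toFinset.filter (fun x => p x = true)).card : Nat) := by
  have h2 : (l.filter p).toFinset = l.toFinset.filter (fun x => p x = true) := by
    ext x; simp
  rw [← h2, List.toFinset_card_of_nodup (h.filter p)]

theorem countAllA_eq (g : List String) :
    countAllA g = ((((g.map String.toList).flatten.toFinset.filter
      (fun c => ((g.map String.toList).flatten.count c : Int) = (g.length : Int))).card : Nat) : Int) := by
  unfold countAllA
  simp only [ctr_fold_eq]
  set l := (g.map String.toList).flatten with hl
  set n : Int := (g.length : Int) with hn
  have hkeys : (PySem.Dict.counter l : PySem.Dict Char Int).keys = PySem.List.dedup l := by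
    rw [PySem.Dict.keys_counter]; simp
  rw [show (fun (acc : Int) q => if (PySem.Dict.counter l).getD q 0 = n then acc + 1 else acc)
      = (fun (acc : Int) q => if (decide ((PySem.Dict.counter l).getD q 0 = n)) = true then acc + 1 else acc)
    from by funext acc q; simp]
  rw [PySem.List.foldl_count_if, hkeys]
  rw [List.countP_eq_length_filter]
  have hnd := PySem.List.nodup_dedup l
  rw [show ((0 : Int) + ((PySem.List.dedup l).filter
      (fun q => decide ((PySem.Dict.counter l).getD q 0 = n))).length)
    = (((PySem.List.dedup l).filter (fun q => decide ((PySem.Dict.counter l).getD q 0 = n))).length : Int)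
    by omega]
  rw [nodup_filter_length _ _ hnd]
  congr 1
  rw [← toFinset_dedup l]
  apply congrArg Finset.card
  apply Finset.filter_congr
  intro x hx
  simp [PySem.Dict.getD_counter]

-- B's per-group run scan equals A's two helper counts
theorem group_eq (g : List String) :
    pvRuns (g.length : Int) (PySem.List.sorted (g.map String.toList).flatten (fun x => x) false)
      = (countOneA g, countAllA g) := by
  set l := (g.map String.toList).flatten with hl
  set s := PySem.List.sorted l (fun x => x) false with hs
  have hperm : s.Perm l := PySem.List.sorted_perm _ _ _
  have hpw : s.Pairwise (· ≤ ·) := by simpa using PySem.List.sorted_pairwise l (fun x => x)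
  rw [pvRuns_spec _ _ hpw, countOneA_eq, countAllA_eq]
  have hfin : s.toFinset = l.toFinset := List.toFinset_eq_of_perm _ _ hperm
  have hcnt : (l.toFinset.filter (fun c => (s.count c : Int) = (g.length : Int)))
      = l.toFinset.filter (fun c => (l.count c : Int) = (g.length : Int)) := by
    apply Finset.filter_congr
    intro x hx
    rw [hperm.count_eq x]
  rw [hfin, hcnt]

-- the grouping folds of solve and solve_alt stay related line by line
theorem loop_eq (ls : List String) (g : List String) (o a : Int) :
    (ls.foldl (fun (st : List String × Int × Int) line =>
        if line = "" then ([], st.2.1 + countOneA st.1, st.2.2 + countAllA st.1)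
        else (st.1 ++ [line], st.2.1, st.2.2)) (g, o, a)).2
      = (ls.foldl (fun (st : (List Char × Int) × Int × Int) line =>
        if line = "" then
          let p := pvRuns st.1.2 (PySem.List.sorted st.1.1 (fun x => x) false)
          (([], 0), st.2.1 + p.1, st.2.2 + p.2)
        else ((st.1.1 ++ line.toList, st.1.2 + 1), st.2.1, st.2.2))
        (((g.map String.toList).flatten, (g.length : Int)), o, a)).2 := by
  induction ls generalizing g o a with
  | nil => rfl
  | cons line ls ih =>
    simp only [List.foldl_cons]
    by_cases hline : line = ""
    · rw [if_pos hline, if_pos hline]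
      have h := ih [] (o + countOneA g) (a + countAllA g)
      simpa [group_eq g] using h
    · rw [if_neg hline, if_neg hline]
      have h := ih (g ++ [line]) o a
      simpa [List.map_append, List.flatten_append] using h

-- ===== VERDICT (by name: the statement is the Claim_ definition above) =====
theorem solve_spec : Claim_equal_solve := by
  intro lines _
  show solve lines = solve_alt lines
  have h := loop_eq (lines ++ [""]) [] 0 0
  simp only [List.map_nil, List.flatten_nil, List.length_nil, Nat.cast_zero] at h
  exact congrArg (fun z : Int × Int => (z.1, z.2)) h
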